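-- pv_equiv track=rewrite | github.com/mmm1h/talk2agent | talk2agent/acp/client_terminal.py | _append_terminal_output
-- ===== SOURCE A (Python) =====
-- def _append_terminal_output(existing_text: str, new_text: str, limit: int) -> tuple[str, bool]:
--     combined = existing_text + new_text
--     if limit <= 0:
--         return "", bool(combined)
--     if len(combined.encode("utf-8")) <= limit:
--         return combined, False
--
--     trimmed = combined
--     while trimmed and len(trimmed.encode("utf-8")) > limit:
--         trimmed = trimmed[1:]
--     return trimmed, True
-- ===== SOURCE B (Python) =====
-- def _append_terminal_output(existing_text: str, new_text: str, limit: int) -> tuple[str, bool]: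
--     combined = existing_text + new_text
--     if limit <= 0:
--         return "", bool(combined)
--     sizes = [len(c.encode("utf-8")) for c in combined]
--     total = sum(sizes)
--     if total <= limit:
--         return combined, False
--     excess = total - limit
--     dropped = 0
--     i = 0
--     while dropped < excess:
--         dropped += sizes[i]
--         i += 1
--     return combined[i:], True
-- ===== Notes on version B (the rewrite author's own statement) =====
-- stated objective: faster
-- what changed: Instead of re-encoding the whole remaining string after each single-character trim (quadratic), B computes per-character byte sizes once and advances a cursor in one pass until the accumulated dropped bytes cover the excess, then takes one suffix slice.
import Mathlib
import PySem

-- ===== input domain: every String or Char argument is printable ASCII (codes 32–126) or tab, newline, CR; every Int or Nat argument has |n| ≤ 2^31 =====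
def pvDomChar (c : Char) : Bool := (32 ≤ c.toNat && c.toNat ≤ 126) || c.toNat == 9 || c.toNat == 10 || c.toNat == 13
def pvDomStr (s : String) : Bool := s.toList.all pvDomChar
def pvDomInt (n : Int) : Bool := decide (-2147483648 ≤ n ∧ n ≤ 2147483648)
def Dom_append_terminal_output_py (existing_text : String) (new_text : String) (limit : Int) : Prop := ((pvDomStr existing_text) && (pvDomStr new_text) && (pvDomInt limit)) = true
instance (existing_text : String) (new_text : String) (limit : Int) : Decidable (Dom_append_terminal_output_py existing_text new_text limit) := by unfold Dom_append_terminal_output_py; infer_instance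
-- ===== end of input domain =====

-- B replaces A's quadratic re-encode-after-each-trim loop by a single pass over
-- per-character byte sizes (compute excess once, advance a cursor); asymptotically faster.


-- ===== PORT A =====
-- UTF-8 byte size of one character (exact for all scalar values; on Dom every char is ASCII, size 1)
def pvCharUtf8Len (c : Char) : Int :=
  if c.toNat < 128 then 1 else if c.toNat < 2048 then 2 else if c.toNat < 65536 then 3 else 4

-- len(s.encode("utf-8"))
def pvUtf8Len (l : List Char) : Int := (l.map pvCharUtf8Len).sum

-- the while loop: while trimmed and len(trimmed.encode("utf-8")) > limit: trimmed = trimmed[1:]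
def pvTrimLoop (trimmed : List Char) (limit : Int) : List Char :=
  match trimmed with
  | [] => []
  | _ :: rest => if pvUtf8Len trimmed > limit then pvTrimLoop rest limit else trimmed

def append_terminal_output_py (existing_text : String) (new_text : String) (limit : Int) : String × Bool :=
  let combined := existing_text.toList ++ new_text.toList
  if limit ≤ 0 then ("", decide (combined ≠ []))
  else if pvUtf8Len combined ≤ limit then (String.mk combined, false)
  else (String.mk (pvTrimLoop combined limit), true)

-- ===== PORT B =====
-- while dropped < excess: dropped += sizes[i]; i += 1   — then return combined[i:]
-- (cursor i is represented by the untraversed tails of sizes/chars; the final chars tail IS combined[i:])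
def pvDropLoop (sizes : List Int) (chars : List Char) (excess : Int) (dropped : Int) : List Char :=
  match sizes, chars with
  | s :: ss, _ :: cc => if dropped < excess then pvDropLoop ss cc excess (dropped + s) else chars
  | _, _ => chars

def append_terminal_output_py_alt (existing_text : String) (new_text : String) (limit : Int) : String × Bool :=
  let combined := existing_text.toList ++ new_text.toList
  if limit ≤ 0 then ("", decide (combined ≠ []))
  else
    let sizes := combined.map pvCharUtf8Len
    let total := sizes.sum
    if total ≤ limit then (String.mk combined, false)
    else (String.mk (pvDropLoop sizes combined (total - limit) 0), true)

-- ===== PRECONDITION & SPEC =====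
def Spec_append_terminal_output_py (existing_text : String) (new_text : String) (limit : Int) (out : String × Bool) : Prop := out = append_terminal_output_py_alt existing_text new_text limit
instance (existing_text : String) (new_text : String) (limit : Int) (out : String × Bool) : Decidable (Spec_append_terminal_output_py existing_text new_text limit out) := by unfold Spec_append_terminal_output_py; infer_instance

-- ===== CLAIM (what is proved, stated in full; the proofs are below) =====
def Claim_equal_append_terminal_output_py : Prop := ∀ (existing_text : String) (new_text : String) (limit : Int), Dom_append_terminal_output_py existing_text new_text limit → Spec_append_terminal_output_py existing_text new_text limit (append_terminal_output_py existing_text new_text limit)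

-- ===== LEMMAS AND PROOFS =====

-- Loop correspondence: B's cursor loop, run on the exact per-char sizes with
-- excess = pvUtf8Len chars - limit + dropped, returns the same suffix as A's trim loop.
theorem pvDropLoop_eq_trimLoop (chars : List Char) (limit : Int) :
    ∀ dropped : Int,
      pvDropLoop (chars.map pvCharUtf8Len) chars (pvUtf8Len chars - limit + dropped) dropped
        = pvTrimLoop chars limit := by
  induction chars with
  | nil => intro dropped; rfl
  | cons c cc ih =>
    intro dropped
    simp only [List.map_cons, pvDropLoop, pvTrimLoop]
    have hlen : pvUtf8Len (c :: cc) = pvCharUtf8Len c + pvUtf8Len cc := by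
      simp [pvUtf8Len]
    by_cases h : pvUtf8Len (c :: cc) > limit
    · have hcond : dropped < pvUtf8Len (c :: cc) - limit + dropped := by omega
      rw [if_pos hcond, if_pos h]
      have : pvUtf8Len (c :: cc) - limit + dropped
           = pvUtf8Len cc - limit + (dropped + pvCharUtf8Len c) := by omega
      rw [this, ih (dropped + pvCharUtf8Len c)]
    · have hcond : ¬ dropped < pvUtf8Len (c :: cc) - limit + dropped := by omega
      rw [if_neg hcond, if_neg h]

-- ===== VERDICT (by name: the statement is the Claim_ definition above) =====
theorem append_terminal_output_py_spec : Claim_equal_append_terminal_output_py := by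
  intro existing_text new_text limit _
  unfold Spec_append_terminal_output_py append_terminal_output_py append_terminal_output_py_alt
  set combined := existing_text.toList ++ new_text.toList with hc
  by_cases h0 : limit ≤ 0
  · simp [h0]
  · rw [if_neg h0, if_neg h0]
    show _ = if pvUtf8Len combined ≤ limit then _ else (String.mk (pvDropLoop (combined.map pvCharUtf8Len) combined (pvUtf8Len combined - limit) 0), true)
    by_cases h1 : pvUtf8Len combined ≤ limit
    · rw [if_pos h1, if_pos h1]
    · rw [if_neg h1, if_neg h1]
      have := pvDropLoop_eq_trimLoop combined limit 0
      rw [add_zero] at this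
      rw [this]
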